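-- pv_equiv track=rewrite | github.com/knol3j/hashnhedge | fix-stray-quotes.py | fix_stray_quotes
-- ===== SOURCE A (Python) =====
-- def fix_stray_quotes(content):
--     """Fix stray quotes in YAML front matter"""
--     lines = content.split('\n')
--
--     # Find YAML front matter boundaries
--     yaml_start = -1
--     yaml_end = -1
--
--     for i, line in enumerate(lines):
--         if line.strip() == '---':
--             if yaml_start == -1:
--                 yaml_start = i
--             else:
--                 yaml_end = i
--                 break
--
--     if yaml_start == -1 or yaml_end == -1:
--         return content
--
--     # Remove lines that are just stray quotes
--     new_lines = []
--     for i, line in enumerate(lines):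
--         if yaml_start < i < yaml_end:
--             # Skip lines that are just a quote character
--             if line.strip() in ['"', "'", '""', "''"]:
--                 continue
--         new_lines.append(line)
--
--     return '\n'.join(new_lines)
-- ===== SOURCE B (Python) =====
-- def fix_stray_quotes(content):
--     """Fix stray quotes in YAML front matter (single-pass three-state machine)."""
--     STRAY = ('"', "'", '""', "''")
--     out = []
--     buf = []
--     state = 0  # 0 = before front matter, 1 = inside, 2 = after
--     for line in content.split('\n'):
--         if state == 0:
--             out.append(line)
--             if line.strip() == '---':
--                 state = 1
--         elif state == 1:
--             if line.strip() == '---':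
--                 out.extend(l for l in buf if l.strip() not in STRAY)
--                 out.append(line)
--                 state = 2
--             else:
--                 buf.append(line)
--         else:
--             out.append(line)
--     if state == 1:
--         out.extend(buf)
--     return '\n'.join(out)
-- ===== Notes on version B (the rewrite author's own statement) =====
-- stated objective: alternative
-- what changed: Replaced A's two separate passes (an enumerate scan computing the two marker indices, then an index-window filter over all lines) with a single pass driven by a three-state machine (before/inside/after the front matter) that buffers front-matter lines and commits them filtered when the closing marker is seen.
import Mathlib
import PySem

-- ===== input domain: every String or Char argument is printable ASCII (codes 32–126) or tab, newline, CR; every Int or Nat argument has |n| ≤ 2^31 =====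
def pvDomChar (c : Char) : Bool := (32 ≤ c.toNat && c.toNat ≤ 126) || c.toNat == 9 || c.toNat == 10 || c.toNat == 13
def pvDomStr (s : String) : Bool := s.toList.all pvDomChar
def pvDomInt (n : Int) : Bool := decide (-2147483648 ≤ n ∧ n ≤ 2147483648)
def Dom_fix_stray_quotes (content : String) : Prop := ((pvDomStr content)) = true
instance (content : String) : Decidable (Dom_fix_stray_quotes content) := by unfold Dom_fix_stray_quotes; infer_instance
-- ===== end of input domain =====

-- B replaces A's two passes (index scan for the markers, then an index-window filter) by a
-- single pass with a three-state machine that buffers the front-matter lines; objective: alternative.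

-- shared tiny predicate: line.strip() in ['"', "'", '""', "''"]
def pvStray (l : String) : Bool := ["\"", "'", "\"\"", "''"].contains (PySem.Str.strip l)

-- ===== PORT A =====
-- the first for-loop of A (with its break), over (line, index), state (yaml_start)
def pvFindA : List String → Nat → Int → Int × Int
  | [], _, ys => (ys, -1)
  | l :: rest, i, ys =>
    if PySem.Str.strip l == "---" then
      if ys == -1 then pvFindA rest (i+1) (i : Int) else (ys, (i : Int))
    else pvFindA rest (i+1) ys

-- the second for-loop of A, building new_lines
def pvFilterA : List String → Nat → Int → Int → List String
  | [], _, _, _ => []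
  | l :: rest, i, ys, ye =>
    if ys < (i:Int) ∧ (i:Int) < ye then
      if pvStray l then pvFilterA rest (i+1) ys ye
      else l :: pvFilterA rest (i+1) ys ye
    else l :: pvFilterA rest (i+1) ys ye

def fix_stray_quotes (content : String) : String :=
  let lines := (PySem.Str.split? content "\n").getD []
  let ys := (pvFindA lines 0 (-1)).1
  let ye := (pvFindA lines 0 (-1)).2
  if ys == -1 || ye == -1 then content
  else PySem.Str.join "\n" (pvFilterA lines 0 ys ye)

-- ===== PORT B =====
-- state 'inside': buffer lines until the closing marker; on the marker commit the filtered
-- buffer, the marker and (state 'after') the rest unchanged; at end-of-input flush raw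
def pvInside : List String → List String → List String
  | [], buf => buf
  | l :: rest, buf =>
    if PySem.Str.strip l == "---" then buf.filter (fun x => !pvStray x) ++ l :: rest
    else pvInside rest (buf ++ [l])

-- state 'before': copy lines until the opening marker
def pvBefore : List String → List String
  | [] => []
  | l :: rest =>
    if PySem.Str.strip l == "---" then l :: pvInside rest []
    else l :: pvBefore rest

def fix_stray_quotes_alt (content : String) : String :=
  PySem.Str.join "\n" (pvBefore ((PySem.Str.split? content "\n").getD []))

-- ===== PRECONDITION & SPEC =====
def Spec_fix_stray_quotes (content : String) (out : String) : Prop := out = fix_stray_quotes_alt content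
instance (content : String) (out : String) : Decidable (Spec_fix_stray_quotes content out) := by unfold Spec_fix_stray_quotes; infer_instance

-- ===== CLAIM (what is proved, stated in full; the proofs are below) =====
def Claim_equal_fix_stray_quotes : Prop := ∀ (content : String), Dom_fix_stray_quotes content → Spec_fix_stray_quotes content (fix_stray_quotes content)

-- ===== LEMMAS AND PROOFS =====

-- index of the first marker line at offset i, or -1
def pvFindEnd : List String → Nat → Int
  | [], _ => -1
  | l :: rest, i => if PySem.Str.strip l == "---" then (i : Int) else pvFindEnd rest (i+1)

theorem pvFindA_found : ∀ (ls : List String) (i : Nat) (ys : Int), ys ≠ -1 →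
    pvFindA ls i ys = (ys, pvFindEnd ls i) := by
  intro ls
  induction ls with
  | nil => intro i ys h; simp [pvFindA, pvFindEnd]
  | cons l rest ih =>
    intro i ys h
    simp only [pvFindA, pvFindEnd]
    by_cases m : PySem.Str.strip l == "---"
    · simp [m, h]
    · simp [m, ih (i+1) ys h]

theorem pvFindEnd_ge : ∀ (ls : List String) (i : Nat),
    pvFindEnd ls i = -1 ∨ (i : Int) ≤ pvFindEnd ls i := by
  intro ls
  induction ls with
  | nil => intro i; simp [pvFindEnd]
  | cons l rest ih =>
    intro i
    simp only [pvFindEnd]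
    by_cases m : PySem.Str.strip l == "---"
    · simp [m]
    · simp only [m, if_neg, Bool.false_eq_true, not_false_iff]
      rcases ih (i+1) with h | h
      · exact Or.inl h
      · right; omega

theorem pvFindEnd_shift : ∀ (ls : List String) (i : Nat),
    pvFindEnd ls (i+1) = if pvFindEnd ls i = -1 then -1 else pvFindEnd ls i + 1 := by
  intro ls
  induction ls with
  | nil => intro i; simp [pvFindEnd]
  | cons l rest ih =>
    intro i
    simp only [pvFindEnd]
    by_cases m : PySem.Str.strip l == "---"
    · have h1 : ((i : Int)) ≠ -1 := by omega
      rw [if_pos m, if_pos m, if_neg h1]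
      push_cast; ring
    · rw [if_neg m, if_neg m]
      exact ih (i+1)

-- shift of A's first loop with sentinel state
theorem pvFindA_shift : ∀ (ls : List String) (i : Nat),
    pvFindA ls (i+1) (-1) =
      ((if (pvFindA ls i (-1)).1 = -1 then -1 else (pvFindA ls i (-1)).1 + 1),
       (if (pvFindA ls i (-1)).2 = -1 then -1 else (pvFindA ls i (-1)).2 + 1)) := by
  intro ls
  induction ls with
  | nil => intro i; simp [pvFindA]
  | cons l rest ih =>
    intro i
    simp only [pvFindA]
    by_cases m : PySem.Str.strip l == "---"
    · have h1 : ((i : Int)) ≠ -1 := by omega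
      have h2 : (((i+1 : Nat)) : Int) ≠ -1 := by push_cast; omega
      rw [if_pos m, if_pos m]
      simp only [show ((-1 : Int) == -1) = true from rfl, if_true]
      rw [pvFindA_found rest (i+1+1) _ h2, pvFindA_found rest (i+1) _ h1]
      rw [pvFindEnd_shift rest (i+1)]
      simp only [Prod.mk.injEq, if_neg h1]
      refine ⟨by push_cast; ring, trivial⟩
    · rw [if_neg m, if_neg m]
      exact ih (i+1)

theorem pvFindA_fst_ge : ∀ (ls : List String) (i : Nat),
    (pvFindA ls i (-1)).1 = -1 ∨ (i:Int) ≤ (pvFindA ls i (-1)).1 := by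
  intro ls
  induction ls with
  | nil => intro i; simp [pvFindA]
  | cons l rest ih =>
    intro i
    simp only [pvFindA]
    by_cases m : PySem.Str.strip l == "---"
    · have h1 : ((i : Int)) ≠ -1 := by omega
      rw [if_pos m]
      simp only [show ((-1 : Int) == -1) = true from rfl, if_true]
      rw [pvFindA_found rest (i+1) _ h1]
      right; simp
    · rw [if_neg m]
      rcases ih (i+1) with h | h
      · exact Or.inl h
      · right; push_cast at h; omega

theorem pvFindA_snd_ge : ∀ (ls : List String) (i : Nat),
    (pvFindA ls i (-1)).2 = -1 ∨ (0:Int) ≤ (pvFindA ls i (-1)).2 := by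
  intro ls
  induction ls with
  | nil => intro i; simp [pvFindA]
  | cons l rest ih =>
    intro i
    simp only [pvFindA]
    by_cases m : PySem.Str.strip l == "---"
    · have h1 : ((i : Int)) ≠ -1 := by omega
      rw [if_pos m]
      simp only [show ((-1 : Int) == -1) = true from rfl, if_true]
      rw [pvFindA_found rest (i+1) _ h1]
      rcases pvFindEnd_ge rest (i+1) with h | h
      · exact Or.inl h
      · right; push_cast at h; omega
    · rw [if_neg m]
      exact ih (i+1)

theorem pvFilterA_shift : ∀ (ls : List String) (i : Nat) (a e : Int),
    pvFilterA ls (i+1) (a+1) (e+1) = pvFilterA ls i a e := by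
  intro ls
  induction ls with
  | nil => intro i a e; simp [pvFilterA]
  | cons l rest ih =>
    intro i a e
    have hc : (a + 1 < ((i+1 : Nat) : Int) ∧ ((i+1 : Nat) : Int) < e + 1) ↔ (a < (i:Int) ∧ (i:Int) < e) := by
      push_cast; omega
    simp only [pvFilterA]
    by_cases h : a < (i:Int) ∧ (i:Int) < e
    · rw [if_pos (hc.mpr h), if_pos h, ih]
    · rw [if_neg (fun hh => h (hc.mp hh)), if_neg h, ih]

theorem pvFilterA_past : ∀ (ls : List String) (i : Nat) (a e : Int), e ≤ (i:Int) →
    pvFilterA ls i a e = ls := by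
  intro ls
  induction ls with
  | nil => intro i a e _; simp [pvFilterA]
  | cons l rest ih =>
    intro i a e h
    have : ¬ (a < (i:Int) ∧ (i:Int) < e) := by omega
    simp only [pvFilterA, if_neg this]
    rw [ih (i+1) a e (by push_cast; omega)]

theorem pvInside_noMarker : ∀ (ls : List String) (i : Nat) (buf : List String),
    pvFindEnd ls i = -1 → pvInside ls buf = buf ++ ls := by
  intro ls
  induction ls with
  | nil => intro i buf _; simp [pvInside]
  | cons l rest ih =>
    intro i buf h
    simp only [pvFindEnd] at h
    by_cases m : PySem.Str.strip l == "---"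
    · rw [if_pos m] at h; omega
    · rw [if_neg m] at h
      simp only [pvInside, if_neg m]
      rw [ih (i+1) (buf ++ [l]) h]
      simp

theorem pvInside_marker : ∀ (ls : List String) (i : Nat) (a e : Int) (buf : List String),
    a < (i:Int) → pvFindEnd ls i = e → e ≠ -1 →
    pvInside ls buf = buf.filter (fun x => !pvStray x) ++ pvFilterA ls i a e := by
  intro ls
  induction ls with
  | nil => intro i a e buf _ h he; simp [pvFindEnd] at h; omega
  | cons l rest ih =>
    intro i a e buf ha h he
    simp only [pvFindEnd] at h
    by_cases m : PySem.Str.strip l == "---"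
    · rw [if_pos m] at h
      have hc : ¬ (a < (i:Int) ∧ (i:Int) < e) := by omega
      simp only [pvInside, if_pos m, pvFilterA, if_neg hc]
      rw [pvFilterA_past rest (i+1) a e (by push_cast; omega)]
    · rw [if_neg m] at h
      have hge : (i:Int) + 1 ≤ e := by
        rcases pvFindEnd_ge rest (i+1) with h' | h'
        · rw [h'] at h; omega
        · rw [← h]; push_cast at h' ⊢; omega
      have hc : (a < (i:Int) ∧ (i:Int) < e) := by omega
      simp only [pvInside, if_neg m, pvFilterA, if_pos hc]
      rw [ih (i+1) a e (buf ++ [l]) (by push_cast; omega) h he]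
      by_cases s : pvStray l
      · simp [s, List.filter_append]
      · simp [s, List.filter_append]

-- A's whole list-level computation equals B's state machine
theorem pvMain : ∀ (ls : List String),
    (if (pvFindA ls 0 (-1)).1 = -1 ∨ (pvFindA ls 0 (-1)).2 = -1 then ls
     else pvFilterA ls 0 (pvFindA ls 0 (-1)).1 (pvFindA ls 0 (-1)).2) = pvBefore ls := by
  intro ls
  induction ls with
  | nil => simp [pvFindA, pvBefore]
  | cons l rest ih =>
    by_cases m : PySem.Str.strip l == "---"
    · have hA : pvFindA (l :: rest) 0 (-1) = (0, pvFindEnd rest 1) := by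
        simp only [pvFindA, if_pos m, show ((-1 : Int) == -1) = true from rfl, if_true,
          Nat.cast_zero]
        exact pvFindA_found rest 1 0 (by omega)
      rw [hA]
      simp only [pvBefore, if_pos m]
      by_cases he : pvFindEnd rest 1 = -1
      · rw [if_pos (Or.inr he)]
        rw [pvInside_noMarker rest 1 [] he]
        simp
      · have h0 : ¬ ((0:Int) = -1 ∨ pvFindEnd rest 1 = -1) := by
          rw [not_or]
          exact ⟨by omega, he⟩
        rw [if_neg h0]
        have hc : ¬ ((0:Int) < ((0:Nat):Int) ∧ ((0:Nat):Int) < pvFindEnd rest 1) := by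
          rintro ⟨h', _⟩
          simp at h'
        simp only [pvFilterA, if_neg hc]
        rw [pvInside_marker rest (0+1) 0 (pvFindEnd rest 1) [] (by simp) rfl he]
        simp
    · have hA : pvFindA (l :: rest) 0 (-1) = pvFindA rest (0+1) (-1) := by
        simp only [pvFindA, if_neg m]
      rw [hA, pvFindA_shift rest 0]
      simp only [pvBefore, if_neg m]
      by_cases h1 : (pvFindA rest 0 (-1)).1 = -1
      · rw [if_pos (Or.inl (by rw [if_pos h1]))]
        rw [if_pos (Or.inl h1)] at ih
        exact congrArg (List.cons l) ih
      · by_cases h2 : (pvFindA rest 0 (-1)).2 = -1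
        · rw [if_pos (Or.inr (by rw [if_pos h2]))]
          rw [if_pos (Or.inr h2)] at ih
          exact congrArg (List.cons l) ih
        · have ha0 : (0:Int) ≤ (pvFindA rest 0 (-1)).1 := by
            rcases pvFindA_fst_ge rest 0 with h | h
            · exact absurd h h1
            · push_cast at h; omega
          have hb0 : (0:Int) ≤ (pvFindA rest 0 (-1)).2 := by
            rcases pvFindA_snd_ge rest 0 with h | h
            · exact absurd h h2
            · exact h
          have hni : ¬ ((if (pvFindA rest 0 (-1)).1 = -1 then (-1:Int) else (pvFindA rest 0 (-1)).1 + 1) = -1 ∨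
              (if (pvFindA rest 0 (-1)).2 = -1 then (-1:Int) else (pvFindA rest 0 (-1)).2 + 1) = -1) := by
            rw [if_neg h1, if_neg h2, not_or]
            exact ⟨by omega, by omega⟩
          rw [if_neg hni, if_neg h1, if_neg h2]
          have hc0 : ¬ ((pvFindA rest 0 (-1)).1 + 1 < ((0:Nat):Int) ∧
              ((0:Nat):Int) < (pvFindA rest 0 (-1)).2 + 1) := by
            rintro ⟨h', _⟩
            push_cast at h'
            omega
          simp only [pvFilterA, if_neg hc0]
          rw [pvFilterA_shift rest 0 (pvFindA rest 0 (-1)).1 (pvFindA rest 0 (-1)).2]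
          rw [if_neg (by rw [not_or]; exact ⟨h1, h2⟩)] at ih
          exact congrArg (List.cons l) ih

theorem pvIntercalateSingleton (sep x : List Char) : List.intercalate sep [x] = x := by
  simp [List.intercalate]

theorem pvIntercalateConsCons (sep x y : List Char) (xs : List (List Char)) :
    List.intercalate sep (x :: y :: xs) = x ++ sep ++ List.intercalate sep (y :: xs) := by
  simp [List.intercalate, List.intersperse]

theorem pvIntercalateAppend (sep x : List Char) : ∀ (xs : List (List Char)), xs ≠ [] →
    List.intercalate sep (xs ++ [x]) = List.intercalate sep xs ++ sep ++ x := by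
  intro xs
  induction xs with
  | nil => intro h; exact absurd rfl h
  | cons y ys ih =>
    intro _
    cases ys with
    | nil => simp [pvIntercalateConsCons, pvIntercalateSingleton]
    | cons z zs =>
      simp only [List.cons_append]
      rw [pvIntercalateConsCons, pvIntercalateConsCons sep y z zs]
      rw [show z :: (zs ++ [x]) = (z :: zs) ++ [x] from rfl, ih (by simp)]
      simp [List.append_assoc]

-- sep.join(s.split(sep)) == s  (at the Chars level, via the fuelled go)
theorem pvGoJoin (sep : List Char) (hsep : sep ≠ []) :
    ∀ (fuel : Nat) (l cur : List Char) (acc : List (List Char)), l.length < fuel →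
    List.intercalate sep (PySem.Chars.splitOn.go sep fuel l cur acc) =
      List.intercalate sep acc.reverse ++ (if acc.isEmpty then [] else sep) ++ cur.reverse ++ l := by
  intro fuel
  induction fuel with
  | zero => intro l cur acc h; omega
  | succ fuel ih =>
    intro l cur acc h
    match l with
    | [] =>
      show List.intercalate sep ((cur.reverse :: acc).reverse) = _
      rw [List.reverse_cons]
      cases acc with
      | nil => simp [List.intercalate]
      | cons a as =>
        have hne : (a :: as).reverse ≠ [] := by simp
        rw [pvIntercalateAppend sep cur.reverse (a::as).reverse hne]
        simp [List.append_assoc]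
    | c :: rest =>
      show List.intercalate sep (if sep.isPrefixOf (c :: rest) = true then
          PySem.Chars.splitOn.go sep fuel (List.drop sep.length (c :: rest)) [] (cur.reverse :: acc)
        else PySem.Chars.splitOn.go sep fuel rest (c :: cur) acc) = _
      by_cases hp : sep.isPrefixOf (c :: rest) = true
      · rw [if_pos hp]
        have hpre : sep <+: (c :: rest) := List.isPrefixOf_iff_prefix.mp hp
        have hslen : 1 ≤ sep.length := by cases sep with | nil => exact absurd rfl hsep | cons _ _ => simp
        have hdrop : (List.drop sep.length (c :: rest)).length < fuel := by
          simp only [List.length_drop]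
          simp only [List.length_cons] at h ⊢
          omega
        rw [ih _ [] (cur.reverse :: acc) hdrop]
        rw [List.reverse_cons]
        have heq : (c :: rest) = sep ++ List.drop sep.length (c :: rest) := by
          obtain ⟨t, ht⟩ := hpre
          conv_lhs => rw [← ht]
          congr 1
          rw [← ht, List.drop_left]
        cases acc with
        | nil =>
          simp only [List.reverse_nil, List.nil_append, List.isEmpty_nil, if_true,
            List.isEmpty_cons]
          rw [pvIntercalateSingleton]
          conv_rhs => rw [heq]
          simp [List.intercalate]
        | cons a as =>
          have hne : (a :: as).reverse ≠ [] := by simp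
          rw [pvIntercalateAppend sep cur.reverse (a::as).reverse hne]
          simp only [List.isEmpty_cons, List.reverse_nil]
          conv_rhs => rw [heq]
          simp [List.append_assoc]
      · rw [if_neg hp]
        have : rest.length < fuel := by simp only [List.length_cons] at h; omega
        rw [ih rest (c :: cur) acc this]
        simp [List.append_assoc]

theorem pvSplitOnJoin (sep cs : List Char) (h : sep ≠ []) :
    List.intercalate sep (PySem.Chars.splitOn cs sep) = cs := by
  unfold PySem.Chars.splitOn
  rw [pvGoJoin sep h (cs.length + 1) cs [] [] (by omega)]
  simp [List.intercalate]

theorem pvJoinSplit (content : String) :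
    PySem.Str.join "\n" ((PySem.Str.split? content "\n").getD []) = content := by
  unfold PySem.Str.join PySem.Str.split? PySem.Chars.split? PySem.Chars.join
  simp only [show ("\n" : String).toList = ['\n'] from rfl, List.isEmpty_cons,
    Bool.false_eq_true, if_false, Option.map_some, Option.getD_some]
  rw [List.map_map]
  have : (String.toList ∘ String.ofList) = id := by
    funext l; simp [String.toList_ofList]
  rw [this, List.map_id]
  rw [pvSplitOnJoin ['\n'] content.toList (by simp)]
  exact String.ofList_toList

-- ===== VERDICT (by name: the statement is the Claim_ definition above) =====
theorem fix_stray_quotes_spec : Claim_equal_fix_stray_quotes := by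
  intro content _
  unfold Spec_fix_stray_quotes fix_stray_quotes fix_stray_quotes_alt
  have hmain := pvMain ((PySem.Str.split? content "\n").getD [])
  by_cases h : (pvFindA ((PySem.Str.split? content "\n").getD []) 0 (-1)).1 = -1 ∨
      (pvFindA ((PySem.Str.split? content "\n").getD []) 0 (-1)).2 = -1
  · have hb : ((pvFindA ((PySem.Str.split? content "\n").getD []) 0 (-1)).1 == -1 ||
        (pvFindA ((PySem.Str.split? content "\n").getD []) 0 (-1)).2 == -1) = true := by
      rcases h with h | h <;> simp [h]
    rw [if_pos hb]
    rw [if_pos h] at hmain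
    rw [← hmain]
    exact (pvJoinSplit content).symm
  · have hb : ¬ (((pvFindA ((PySem.Str.split? content "\n").getD []) 0 (-1)).1 == -1 ||
        (pvFindA ((PySem.Str.split? content "\n").getD []) 0 (-1)).2 == -1) = true) := by
      rw [not_or] at h
      simp [h.1, h.2]
    rw [if_neg hb]
    rw [if_neg h] at hmain
    rw [hmain]
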